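-- pv_equiv track=rewrite | github.com/Simpag/algorithms_and_complexity | lab1/task1/test.py | memoization_helper
-- ===== SOURCE A (Python) =====
-- a = 5
--
-- b = 6
--
-- c = 7
--
-- def memoization_helper(n, buffer):
--     if n < 0:
--         return 10**10
--     elif n == 0:
--         return 0
--     elif buffer[n] is not None:
--         return buffer[n]
--     else:
--         buffer[n] = min(n, 1 + memoization_helper(n-a, buffer), 1 + memoization_helper(n-b, buffer), 1 + memoization_helper(n-c, buffer))
--
--     return buffer[n]
-- ===== SOURCE B (Python) =====
-- a = 5
--
-- b = 6
--
-- c = 7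
--
-- def memoization_helper(n, buffer):
--     # Bottom-up DP: return value equals A's; does NOT mutate `buffer` (A does).
--     if n < 0:
--         return 10**10
--     if n == 0:
--         return 0
--     big = 10**10
--     g = [0] * (n + 1)
--     for k in range(1, n + 1):
--         if buffer[k] is not None:
--             g[k] = buffer[k]
--         else:
--             best = k
--             for d in (a, b, c):
--                 j = k - d
--                 child = big if j < 0 else g[j]
--                 if 1 + child < best:
--                     best = 1 + child
--             g[k] = best
--     return g[n]
-- ===== Notes on version B (the rewrite author's own statement) =====
-- stated objective: alternative
-- what changed: A's buffer-mutating top-down memoized recursion is replaced by a bottom-up DP loop that fills a fresh table g[1..n] in index order (no recursion, caller's buffer not mutated; prefilled buffer entries are still honoured).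
import Mathlib
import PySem

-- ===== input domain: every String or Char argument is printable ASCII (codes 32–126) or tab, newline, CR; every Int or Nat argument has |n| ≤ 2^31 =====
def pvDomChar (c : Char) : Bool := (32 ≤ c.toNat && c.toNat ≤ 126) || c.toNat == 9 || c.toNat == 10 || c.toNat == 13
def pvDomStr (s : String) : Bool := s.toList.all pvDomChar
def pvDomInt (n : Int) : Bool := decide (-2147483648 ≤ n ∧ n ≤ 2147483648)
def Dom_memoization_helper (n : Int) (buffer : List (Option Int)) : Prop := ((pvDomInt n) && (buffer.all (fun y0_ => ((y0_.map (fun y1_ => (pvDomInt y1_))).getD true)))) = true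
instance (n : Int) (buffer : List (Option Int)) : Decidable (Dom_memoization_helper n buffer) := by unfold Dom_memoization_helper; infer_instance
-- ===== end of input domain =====

-- B replaces A's buffer-mutating top-down memoized recursion by a bottom-up DP loop over
-- 1..n (alternative decomposition, no recursion).  Equivalence is about the RETURN value
-- only: Python A mutates `buffer` in place, B does not.

-- ===== PORT A =====
-- A's recursion, threading the mutated buffer; `none` = IndexError (excluded by Pre_).

def memoA (n : Int) (buffer : List (Option Int)) : Option (Int × List (Option Int)) :=
  if _h : n < 0 then some (10 ^ 10, buffer)
  else if _h0 : n = 0 then some (0, buffer)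
  else
    match PySem.List.pyGet? buffer n with
    | none => none
    | some (some v) => some (v, buffer)
    | some none =>
      match memoA (n - 5) buffer with
      | none => none
      | some (v1, b1) =>
        match memoA (n - 6) b1 with
        | none => none
        | some (v2, b2) =>
          match memoA (n - 7) b2 with
          | none => none
          | some (v3, b3) =>
            let m := min (min (min n (1 + v1)) (1 + v2)) (1 + v3)
            let b4 := b3.set n.toNat (some m)
            match PySem.List.pyGet? b4 n with
            | some (some v) => some (v, b4)
            | _ => none
termination_by n.toNat
decreasing_by all_goals omega

def memoization_helper (n : Int) (buffer : List (Option Int)) : Int :=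
  match memoA n buffer with
  | some p => p.1
  | none => 0

-- B: one iteration of the bottom-up loop body
def stepB (buffer : List (Option Int)) (g : List Int) (k : Int) : List Int :=
  match PySem.List.pyGet? buffer k with
  | some (some v) => g.set k.toNat v
  | _ =>
    let best := [(5 : Int), 6, 7].foldl (fun best d =>
      let j := k - d
      let child := if j < 0 then (10 ^ 10 : Int) else (PySem.List.pyGet? g j).getD 0
      if 1 + child < best then 1 + child else best) k
    g.set k.toNat best

def memoization_helper_alt (n : Int) (buffer : List (Option Int)) : Int :=
  if n < 0 then 10 ^ 10
  else if n = 0 then 0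
  else
    (PySem.List.pyGet?
      ((PySem.List.pyRange 1 (n + 1) 1).foldl (stepB buffer) (List.replicate (n + 1).toNat 0))
      n).getD 0


-- ===== PRECONDITION & SPEC =====
-- Pre_ excludes exactly the inputs with 0 < n and n >= len(buffer): there Python A raises IndexError.
def Pre_memoization_helper (n : Int) (buffer : List (Option Int)) : Prop :=
  n ≤ 0 ∨ n < (buffer.length : Int)
instance (n : Int) (buffer : List (Option Int)) : Decidable (Pre_memoization_helper n buffer) := by
  unfold Pre_memoization_helper; infer_instance

def pvWitness_memoization_helper : Int × List (Option Int) := (3, [none, some 1, none, none])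

def Spec_memoization_helper (n : Int) (buffer : List (Option Int)) (out : Int) : Prop := out = memoization_helper_alt n buffer
instance (n : Int) (buffer : List (Option Int)) (out : Int) : Decidable (Spec_memoization_helper n buffer out) := by unfold Spec_memoization_helper; infer_instance

-- ===== CLAIM (what is proved, stated in full; the proofs are below) =====
def Claim_equal_memoization_helper : Prop := ∀ (n : Int) (buffer : List (Option Int)), Dom_memoization_helper n buffer → Pre_memoization_helper n buffer → Spec_memoization_helper n buffer (memoization_helper n buffer)

-- ===== LEMMAS AND PROOFS =====

-- the pure value of A's recursion, computed against the ORIGINAL buffer (no mutation)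
def pureF (buf : List (Option Int)) (k : Nat) : Int :=
  if _hk : k = 0 then 0
  else
    match PySem.List.pyGet? buf (k : Int) with
    | some (some v) => v
    | _ =>
      let c5 := if _ : (k : Int) - 5 < 0 then 10 ^ 10 else pureF buf ((k : Int) - 5).toNat
      let c6 := if _ : (k : Int) - 6 < 0 then 10 ^ 10 else pureF buf ((k : Int) - 6).toNat
      let c7 := if _ : (k : Int) - 7 < 0 then 10 ^ 10 else pureF buf ((k : Int) - 7).toNat
      min (min (min (k : Int) (1 + c5)) (1 + c6)) (1 + c7)
termination_by k
decreasing_by all_goals omega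

def goodBuf (buf0 buf : List (Option Int)) : Prop :=
  buf.length = buf0.length ∧
  ∀ k : Nat, buf[k]? = buf0[k]? ∨ (buf0[k]? = some none ∧ buf[k]? = some (some (pureF buf0 k)))

-- pureF at a positive in-range index whose original entry is None unfolds to the min-recurrence
lemma pureF_none (buf0 : List (Option Int)) (k : Nat) (hk : k ≠ 0)
    (hb : buf0[k]? = some none) :
    pureF buf0 k =
      min (min (min (k : Int)
        (1 + if (k : Int) - 5 < 0 then 10 ^ 10 else pureF buf0 ((k : Int) - 5).toNat))
        (1 + if (k : Int) - 6 < 0 then 10 ^ 10 else pureF buf0 ((k : Int) - 6).toNat))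
        (1 + if (k : Int) - 7 < 0 then 10 ^ 10 else pureF buf0 ((k : Int) - 7).toNat) := by
  rw [pureF]
  simp [hk, PySem.List.pyGet?_natCast, hb]

lemma pureF_some (buf0 : List (Option Int)) (k : Nat) (hk : k ≠ 0) (v : Int)
    (hb : buf0[k]? = some (some v)) : pureF buf0 k = v := by
  rw [pureF]
  simp [hk, PySem.List.pyGet?_natCast, hb]

lemma memoA_good (buf0 : List (Option Int)) :
    ∀ (N : Nat) (n : Int) (buf : List (Option Int)), n.toNat ≤ N → goodBuf buf0 buf →
      n < (buf0.length : Int) →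
      ∃ buf', memoA n buf = some ((if n < 0 then 10 ^ 10 else pureF buf0 n.toNat), buf') ∧
        goodBuf buf0 buf' := by
  intro N
  induction N with
  | zero =>
    intro n buf hN hg hlen
    rw [memoA]
    by_cases h : n < 0
    · exact ⟨buf, by simp [h], hg⟩
    · have h0 : n = 0 := by omega
      subst h0
      refine ⟨buf, ?_, hg⟩
      rw [pureF]; simp
  | succ N ih =>
    intro n buf hN hg hlen
    rw [memoA]
    by_cases h : n < 0
    · exact ⟨buf, by simp [h], hg⟩
    by_cases h0 : n = 0
    · subst h0
      refine ⟨buf, ?_, hg⟩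
      rw [pureF]; simp
    -- 0 < n
    have hpos : 0 < n := by omega
    have hlenb : buf.length = buf0.length := hg.1
    have hklen : n.toNat < buf.length := by omega
    have hkne : n.toNat ≠ 0 := by omega
    have hcast : ((n.toNat : Int)) = n := by omega
    have hread : PySem.List.pyGet? buf n = buf[n.toNat]? := by
      rw [PySem.List.pyGet?_of_nonneg _ (by omega : (0:Int) ≤ n)]
    cases hb0 : buf0[n.toNat]? with
    | none => exact absurd hb0 (by simp; omega)
    | some cell0 =>
      cases cell0 with
      | some v =>
        -- prefilled in buf0: buf agrees (written case impossible)
        have hbuf : buf[n.toNat]? = some (some v) := by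
          rcases hg.2 n.toNat with hs | ⟨hn0, _⟩
          · rw [hs, hb0]
          · rw [hn0] at hb0; cases hb0
        refine ⟨buf, ?_, hg⟩
        rw [hread, hbuf]
        simp [h, h0, pureF_some buf0 n.toNat hkne v hb0]
      | none =>
        rcases hg.2 n.toNat with hs | ⟨_, hw⟩
        · -- still None in buf: recurse
          have hb : buf[n.toNat]? = some none := by rw [hs, hb0]
          obtain ⟨b1, e1, hg1⟩ := ih (n - 5) buf (by omega) hg (by omega)
          obtain ⟨b2, e2, hg2⟩ := ih (n - 6) b1 (by omega) hg1 (by omega)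
          obtain ⟨b3, e3, hg3⟩ := ih (n - 7) b2 (by omega) hg2 (by omega)
          set v1 : Int := if n - 5 < 0 then 10 ^ 10 else pureF buf0 (n - 5).toNat with hv1
          set v2 : Int := if n - 6 < 0 then 10 ^ 10 else pureF buf0 (n - 6).toNat with hv2
          set v3 : Int := if n - 7 < 0 then 10 ^ 10 else pureF buf0 (n - 7).toNat with hv3
          set m : Int := min (min (min n (1 + v1)) (1 + v2)) (1 + v3) with hm
          have hmF : m = pureF buf0 n.toNat := by
            rw [pureF_none buf0 n.toNat hkne hb0, hm, hv1, hv2, hv3, hcast]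
          have hlen3 : n.toNat < b3.length := by rw [hg3.1]; omega
          have hb4read : PySem.List.pyGet? (b3.set n.toNat (some m)) n = some (some m) := by
            rw [PySem.List.pyGet?_of_nonneg _ (by omega : (0:Int) ≤ n)]
            simp [hlen3]
          refine ⟨b3.set n.toNat (some m), ?_, ?_⟩
          · rw [hread, hb]
            simp only [h, h0, dite_false, e1, e2, e3]
            rw [hmF] at hb4read
            rw [← hm]
            simp [hb4read, hmF]
          · constructor
            · simp [hg3.1]
            · intro j
              by_cases hj : j = n.toNat
              · subst hj
                right
                exact ⟨hb0, by simp [hlen3, hmF]⟩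
              · rw [List.getElem?_set_ne (by omega)]
                exact hg3.2 j
        · -- already written: return it
          refine ⟨buf, ?_, hg⟩
          rw [hread, hw]
          simp [h, h0]

lemma step_min (a x : Int) : (if 1 + x < a then 1 + x else a) = min a (1 + x) := by
  rcases le_or_gt a (1 + x) with h | h <;> simp [min_def] <;> omega

lemma stepB_spec (buf0 : List (Option Int)) (G : List Int) (K : Nat) (hK : K ≠ 0)
    (hKlen : K < buf0.length)
    (hc : ∀ j : Int, 0 ≤ j → j < (K : Int) → (PySem.List.pyGet? G j).getD 0 = pureF buf0 j.toNat) :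
    stepB buf0 G (K : Int) = G.set K (pureF buf0 K) := by
  have hb : PySem.List.pyGet? buf0 (K : Int) = buf0[K]? := PySem.List.pyGet?_natCast _ _
  cases hcell : buf0[K]? with
  | none => exact absurd hcell (by simp; omega)
  | some cell =>
    cases cell with
    | some v =>
      simp only [stepB, hb, hcell]
      simp [pureF_some buf0 K hK v hcell]
    | none =>
      simp only [stepB, hb, hcell]
      simp only [List.foldl_cons, List.foldl_nil]
      have e5 : (if ((K : Int) - 5 < 0) then (10 ^ 10 : Int) else (PySem.List.pyGet? G ((K : Int) - 5)).getD 0)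
          = (if ((K : Int) - 5 < 0) then (10 ^ 10 : Int) else pureF buf0 ((K : Int) - 5).toNat) := by
        split_ifs with h
        · rfl
        · exact hc _ (by omega) (by omega)
      have e6 : (if ((K : Int) - 6 < 0) then (10 ^ 10 : Int) else (PySem.List.pyGet? G ((K : Int) - 6)).getD 0)
          = (if ((K : Int) - 6 < 0) then (10 ^ 10 : Int) else pureF buf0 ((K : Int) - 6).toNat) := by
        split_ifs with h
        · rfl
        · exact hc _ (by omega) (by omega)
      have e7 : (if ((K : Int) - 7 < 0) then (10 ^ 10 : Int) else (PySem.List.pyGet? G ((K : Int) - 7)).getD 0)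
          = (if ((K : Int) - 7 < 0) then (10 ^ 10 : Int) else pureF buf0 ((K : Int) - 7).toNat) := by
        split_ifs with h
        · rfl
        · exact hc _ (by omega) (by omega)
      rw [step_min, step_min, step_min, e5, e6, e7, ← pureF_none buf0 K hK hcell]
      simp

lemma fold_g (buf0 : List (Option Int)) (n : Int) (hn : 0 < n) (hlen : n < (buf0.length : Int)) :
    ∀ m : Nat, m ≤ n.toNat →
      (((PySem.List.pyRange 1 ((m : Int) + 1) 1).foldl (stepB buf0)
          (List.replicate (n + 1).toNat 0)).length = (n + 1).toNat) ∧
      ∀ k : Nat, k ≤ m →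
        ((PySem.List.pyRange 1 ((m : Int) + 1) 1).foldl (stepB buf0)
          (List.replicate (n + 1).toNat 0))[k]? = some (pureF buf0 k) := by
  intro m
  induction m with
  | zero =>
    intro _
    rw [PySem.List.pyRange_one_eq_nil (by omega)]
    constructor
    · simp
    · intro k hk
      have hk0 : k = 0 := by omega
      subst hk0
      rw [List.foldl_nil, List.getElem?_replicate]
      rw [pureF]
      simp
      omega
  | succ m ih =>
    intro hm
    obtain ⟨hL, hV⟩ := ih (by omega)
    have hsplit : PySem.List.pyRange 1 ((↑(m + 1) : Int) + 1) 1
        = PySem.List.pyRange 1 ((m : Int) + 1) 1 ++ [((m : Int) + 1)] := by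
      have : ((↑(m + 1) : Int) + 1) = ((m : Int) + 1) + 1 := by push_cast; ring
      rw [this, PySem.List.pyRange_one_succ_right (by omega)]
    rw [hsplit, List.foldl_append, List.foldl_cons, List.foldl_nil]
    set G := (PySem.List.pyRange 1 ((m : Int) + 1) 1).foldl (stepB buf0)
      (List.replicate (n + 1).toNat 0) with hG
    have hcast : ((m : Int) + 1) = ((m + 1 : Nat) : Int) := by push_cast; ring
    have hstep : stepB buf0 G ((m : Int) + 1) = G.set (m + 1) (pureF buf0 (m + 1)) := by
      rw [hcast]
      refine stepB_spec buf0 G (m + 1) (by omega) (by omega) ?_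
      intro j hj0 hjm
      rw [PySem.List.pyGet?_of_nonneg _ hj0, hV j.toNat (by omega)]
      rfl
    rw [hstep]
    constructor
    · simp [hL]
    · intro k hk
      by_cases hkm : k = m + 1
      · subst hkm
        have hlt : m + 1 < G.length := by omega
        simp [hlt]
      · rw [List.getElem?_set_ne (by omega)]
        exact hV k (by omega)

lemma alt_eq_pure (buf0 : List (Option Int)) (n : Int) (hn : 0 < n)
    (hlen : n < (buf0.length : Int)) :
    memoization_helper_alt n buf0 = pureF buf0 n.toNat := by
  unfold memoization_helper_alt
  rw [if_neg (by omega), if_neg (by omega)]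
  obtain ⟨hL, hV⟩ := fold_g buf0 n hn hlen n.toNat le_rfl
  have hcast : ((n.toNat : Int) + 1) = n + 1 := by omega
  rw [hcast] at hL hV
  rw [PySem.List.pyGet?_of_nonneg _ (by omega), hV n.toNat le_rfl]
  rfl

-- ===== VERDICT (by name: the statement is the Claim_ definition above) =====
theorem memoization_helper_spec : Claim_equal_memoization_helper := by
  intro n buffer _ hpre
  unfold Spec_memoization_helper
  by_cases h : n < 0
  · unfold memoization_helper memoization_helper_alt
    rw [memoA]; simp [h]
  by_cases h0 : n = 0
  · subst h0
    unfold memoization_helper memoization_helper_alt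
    rw [memoA]; simp
  · have hlen : n < (buffer.length : Int) := by
      rcases hpre with hp | hp
      · omega
      · exact hp
    have hgood : goodBuf buffer buffer := ⟨rfl, fun k => Or.inl rfl⟩
    obtain ⟨buf', he, -⟩ := memoA_good buffer n.toNat n buffer le_rfl hgood hlen
    unfold memoization_helper
    rw [he]
    simp [h]
    exact (alt_eq_pure buffer n (by omega) hlen).symm
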